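-- pv_equiv track=rewrite | github.com/WangRentu/SCIMAS-AgentKernel | examples/scimas_mve/visualization/trend_dashboard.py | _latest_by_reset
-- ===== SOURCE A (Python) =====
-- from typing import Any, Dict, List, Optional
--
-- def _latest_by_reset(rows: List[Dict[str, Any]], key: str) -> List[Dict[str, Any]]:
--     if not rows:
--         return []
--     start_idx = 0
--     prev_num = None
--     for idx, row in enumerate(rows):
--         try:
--             cur_num = int(row.get(key))
--         except Exception:
--             cur_num = None
--         if prev_num is not None and cur_num is not None and cur_num < prev_num:
--             start_idx = idx
--         prev_num = cur_num
--     return rows[start_idx:]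
-- ===== SOURCE B (Python) =====
-- def _latest_by_reset(rows, key):
--     def num(row):
--         try:
--             return int(row.get(key))
--         except Exception:
--             return None
--     for i in range(len(rows) - 1, 0, -1):
--         cur = num(rows[i])
--         prev = num(rows[i - 1])
--         if cur is not None and prev is not None and cur < prev:
--             return rows[i:]
--     return rows[:]
-- ===== Notes on version B (the rewrite author's own statement) =====
-- stated objective: alternative
-- what changed: Replaces A's full forward scan that tracks the running previous value and the last reset index with a backward scan over adjacent pairs that returns the tail slice at the first (i.e. last) decrease found, terminating early.
import Mathlib
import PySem

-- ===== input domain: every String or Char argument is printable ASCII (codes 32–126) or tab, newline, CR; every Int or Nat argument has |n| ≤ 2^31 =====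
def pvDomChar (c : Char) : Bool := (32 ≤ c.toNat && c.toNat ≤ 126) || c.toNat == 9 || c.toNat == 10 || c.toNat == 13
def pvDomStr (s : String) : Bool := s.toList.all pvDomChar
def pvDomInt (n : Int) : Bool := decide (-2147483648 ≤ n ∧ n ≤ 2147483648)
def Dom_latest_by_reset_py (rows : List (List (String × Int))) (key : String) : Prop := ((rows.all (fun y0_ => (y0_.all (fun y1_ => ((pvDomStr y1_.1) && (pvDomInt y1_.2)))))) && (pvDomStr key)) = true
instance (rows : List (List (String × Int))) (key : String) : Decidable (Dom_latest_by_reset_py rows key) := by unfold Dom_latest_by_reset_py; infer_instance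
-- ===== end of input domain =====

-- B replaces A's forward scan (tracking previous value and last reset index) with an
-- early-terminating backward scan over adjacent pairs; objective: alternative decomposition.


-- shared helper: `int(row.get(key))` under try/except → Option Int
-- (row.get(key) is a dict lookup; int() on an int is the identity, int(None) raises → none)
def pvNum (row : List (String × Int)) (key : String) : Option Int :=
  (PySem.Dict.ofList row).get? key

-- shared helper: `prev is not None and cur is not None and cur < prev`
-- (the decrease test; both A and B test exactly this on a (prev, cur) pair)
def pvDecr (prev cur : Option Int) : Bool :=
  match prev, cur with
  | some pn, some cn => cn < pn
  | _, _ => false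

-- ===== PORT A =====
-- one loop iteration of A: state (start_idx, prev_num), element (idx, row)
def pvStepA (key : String) (s : Int × Option Int) (p : Int × List (String × Int)) :
    Int × Option Int :=
  let cur := pvNum p.2 key
  (if pvDecr s.2 cur then p.1 else s.1, cur)

def latest_by_reset_py (rows : List (List (String × Int))) (key : String) :
    List (List (String × Int)) :=
  if rows = [] then []
  else
    let st := (PySem.List.enumerate rows 0).foldl (pvStepA key) (0, none)
    PySem.List.slice rows (some st.1) none

-- ===== PORT B =====
-- backward loop `for i in range(len(rows)-1, 0, -1)`, counting down; i = j + 1 in the step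
def pvGoB (rows : List (List (String × Int))) (key : String) : Nat → List (List (String × Int))
  | 0 => rows
  | j + 1 =>
    let cur := pvNum (rows.getD (j + 1) []) key
    let prev := pvNum (rows.getD j []) key
    if pvDecr prev cur then PySem.List.slice rows (some ((j + 1 : Nat) : Int)) none
    else pvGoB rows key j

def latest_by_reset_py_alt (rows : List (List (String × Int))) (key : String) :
    List (List (String × Int)) :=
  pvGoB rows key (rows.length - 1)

-- ===== PRECONDITION & SPEC =====
def Spec_latest_by_reset_py (rows : List (List (String × Int))) (key : String) (out : List (List (String × Int))) : Prop := out = latest_by_reset_py_alt rows key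
instance (rows : List (List (String × Int))) (key : String) (out : List (List (String × Int))) : Decidable (Spec_latest_by_reset_py rows key out) := by unfold Spec_latest_by_reset_py; infer_instance

-- ===== CLAIM (what is proved, stated in full; the proofs are below) =====
def Claim_equal_latest_by_reset_py : Prop := ∀ (rows : List (List (String × Int))) (key : String), Dom_latest_by_reset_py rows key → Spec_latest_by_reset_py rows key (latest_by_reset_py rows key)

-- ===== LEMMAS AND PROOFS =====

-- A's fold, named for the lemmas
def pvFoldA (rows : List (List (String × Int))) (key : String) : Int × Option Int :=
  (PySem.List.enumerate rows 0).foldl (pvStepA key) (0, none)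

theorem pvFoldA_concat (xs : List (List (String × Int))) (x : List (String × Int))
    (key : String) :
    pvFoldA (xs ++ [x]) key = pvStepA key (pvFoldA xs key) ((xs.length : Int), x) := by
  unfold pvFoldA
  rw [PySem.List.enumerate_append]
  simp [PySem.List.enumerate_cons, PySem.List.enumerate_nil]

theorem pvFoldA_snd_concat (xs : List (List (String × Int))) (x : List (String × Int))
    (key : String) : (pvFoldA (xs ++ [x]) key).2 = pvNum x key := by
  rw [pvFoldA_concat]; rfl

theorem pvFoldA_fst_bound (xs : List (List (String × Int))) (key : String) (h : xs ≠ []) :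
    0 ≤ (pvFoldA xs key).1 ∧ (pvFoldA xs key).1 < (xs.length : Int) := by
  induction xs using List.reverseRecOn with
  | nil => exact absurd rfl h
  | append_singleton ys y ih =>
    rw [pvFoldA_concat]
    by_cases hy : ys = []
    · subst hy
      simp [pvFoldA, PySem.List.enumerate_nil, pvStepA]
    · have hb := ih hy
      simp only [pvStepA, List.length_append, List.length_singleton]
      split_ifs <;> (push_cast; simp; try omega)

theorem pvGoB_append (xs : List (List (String × Int))) (x : List (String × Int))
    (key : String) (j : Nat) (h : j ≤ xs.length - 1) :
    pvGoB (xs ++ [x]) key j = pvGoB xs key j ++ [x] := by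
  induction j with
  | zero => simp [pvGoB]
  | succ i ih =>
    have hlt : i + 1 < xs.length := by omega
    have h1 : (xs ++ [x]).getD (i + 1) [] = xs.getD (i + 1) [] := by
      simp [List.getD, List.getElem?_append_left hlt]
    have h2 : (xs ++ [x]).getD i [] = xs.getD i [] := by
      simp [List.getD, List.getElem?_append_left (by omega : i < xs.length)]
    unfold pvGoB
    rw [h1, h2]
    dsimp only
    split_ifs
    · rw [PySem.List.slice_from_natCast, PySem.List.slice_from_natCast,
        List.drop_append_of_le_length (by omega)]
    · exact ih (by omega)

theorem pv_main (rows : List (List (String × Int))) (key : String) :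
    latest_by_reset_py rows key = latest_by_reset_py_alt rows key := by
  induction rows using List.reverseRecOn with
  | nil => rfl
  | append_singleton xs x ih =>
    have hne : xs ++ [x] ≠ [] := by simp
    unfold latest_by_reset_py latest_by_reset_py_alt
    rw [if_neg hne]
    show PySem.List.slice (xs ++ [x]) (some (pvFoldA (xs ++ [x]) key).1) none = _
    rw [pvFoldA_concat]
    by_cases hxs : xs = []
    · subst hxs
      simp only [List.nil_append, List.length_singleton]
      show PySem.List.slice [x] (some (pvStepA key (pvFoldA [] key) (0, x)).1) none
        = pvGoB [x] key 0
      have h0 : (pvStepA key (pvFoldA [] key) (0, x)).1 = 0 := by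
        simp [pvFoldA, PySem.List.enumerate_nil, pvStepA, pvDecr]
      rw [h0, pvGoB]
      simp [PySem.List.slice]
    · -- xs nonempty: the last pair compared is (xs.getLast, x)
      obtain ⟨m, hm⟩ : ∃ m, xs.length = m + 1 :=
        ⟨xs.length - 1, by have := List.length_pos_iff.mpr hxs; omega⟩
      have hlast : (pvFoldA xs key).2 = pvNum (xs.getD m []) key := by
        rcases List.eq_nil_or_concat xs with h | ⟨ys, y, hy⟩
        · exact absurd h hxs
        · subst hy
          have hmy : m = ys.length := by
            simp at hm
            omega
          rw [List.concat_eq_append, pvFoldA_snd_concat, hmy]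
          simp [List.getD]
      have hAtail : PySem.List.slice (xs ++ [x]) (some (pvFoldA xs key).1) none
          = pvGoB (xs ++ [x]) key m := by
        rw [pvGoB_append xs x key m (by omega)]
        obtain ⟨h0, hlt⟩ := pvFoldA_fst_bound xs key hxs
        rw [PySem.List.slice_from _ h0, List.drop_append_of_le_length (by omega)]
        have hAxs : latest_by_reset_py xs key
            = PySem.List.slice xs (some (pvFoldA xs key).1) none := by
          unfold latest_by_reset_py
          rw [if_neg hxs]
          rfl
        rw [← PySem.List.slice_from _ h0, ← hAxs, ih]
        unfold latest_by_reset_py_alt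
        rw [hm]
        simp only [Nat.add_sub_cancel]
      have hlen : (xs ++ [x]).length - 1 = m + 1 := by simp [hm]
      rw [hlen]
      have hg1 : (xs ++ [x]).getD (m + 1) [] = x := by
        rw [← hm]
        simp [List.getD]
      have hg2 : (xs ++ [x]).getD m [] = xs.getD m [] := by
        have hmlt : m < xs.length := by
          omega
        simp [List.getD, List.getElem?_append_left hmlt]
      show PySem.List.slice (xs ++ [x])
          (some (pvStepA key (pvFoldA xs key) ((xs.length : Int), x)).1) none
        = pvGoB (xs ++ [x]) key (m + 1)
      unfold pvGoB
      rw [hg1, hg2]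
      dsimp only [pvStepA]
      rw [hlast]
      split_ifs
      · rw [hm]
      · exact hAtail

-- ===== VERDICT (by name: the statement is the Claim_ definition above) =====
theorem latest_by_reset_py_spec : Claim_equal_latest_by_reset_py := by
  intro rows key _
  exact pv_main rows key
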